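-- pv_equiv track=rewrite | github.com/Arya-t/TPPO-Sequential-Investment | Core_DRL.py | verify_sequence
-- ===== SOURCE A (Python) =====
-- def verify_sequence(sequence, region_num):
--     all_regions = set(range(1, region_num + 1))
--     included = set()
--
--     for stage in sequence:
--         stage_set = set(stage)
--
--         if len(stage) != len(stage_set):
--             return False
--
--         if not stage_set.isdisjoint(included):
--             return False
--         included.update(stage_set)
--
--
--     return included == all_regions
-- ===== SOURCE B (Python) =====
-- def verify_sequence(sequence, region_num):
--     flat = [r for stage in sequence for r in stage]
--     return sorted(flat) == list(range(1, region_num + 1))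
-- ===== Notes on version B (the rewrite author's own statement) =====
-- stated objective: simpler
-- what changed: Replaces the incremental running-set loop with per-stage duplicate/disjointness checks by a single flatten-and-sort: the sequence is valid iff the flattened stages sorted equal [1..region_num].
import Mathlib
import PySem

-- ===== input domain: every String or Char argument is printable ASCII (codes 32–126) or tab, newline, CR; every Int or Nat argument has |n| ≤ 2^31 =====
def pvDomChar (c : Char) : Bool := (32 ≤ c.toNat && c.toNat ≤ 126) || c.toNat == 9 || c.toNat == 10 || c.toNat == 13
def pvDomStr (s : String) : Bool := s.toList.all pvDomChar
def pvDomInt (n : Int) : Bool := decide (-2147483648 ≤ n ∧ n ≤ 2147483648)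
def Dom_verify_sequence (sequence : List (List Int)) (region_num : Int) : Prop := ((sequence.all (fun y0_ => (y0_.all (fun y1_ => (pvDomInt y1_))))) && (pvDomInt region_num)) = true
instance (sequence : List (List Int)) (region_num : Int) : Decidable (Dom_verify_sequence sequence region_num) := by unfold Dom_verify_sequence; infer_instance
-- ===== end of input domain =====

-- B replaces A's incremental running-set loop by "flatten, sort, compare with [1..region_num]" (simpler decomposition, same behaviour).

-- ===== PORT A =====
-- the 'for stage in sequence' loop with early 'return False'; 'included' is the running set
def verify_sequence_loop (all_regions : PySem.Set Int) :
    List (List Int) → PySem.Set Int → Bool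
  | [], included => PySem.Set.equal included all_regions
  | stage :: rest, included =>
    let stage_set : PySem.Set Int := PySem.Set.ofList stage
    if stage.length ≠ stage_set.length then false
    else if ¬ (PySem.Set.isdisjoint stage_set included = true) then false
    else verify_sequence_loop all_regions rest (PySem.Set.update included stage_set)

def verify_sequence (sequence : List (List Int)) (region_num : Int) : Bool :=
  let all_regions : PySem.Set Int := PySem.Set.ofList (PySem.List.pyRange 1 (region_num + 1) 1)
  verify_sequence_loop all_regions sequence PySem.Set.empty

-- ===== PORT B =====
def verify_sequence_alt (sequence : List (List Int)) (region_num : Int) : Bool :=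
  let flat : List Int := sequence.flatten
  PySem.List.sorted flat (fun x => x) false == PySem.List.pyRange 1 (region_num + 1) 1

-- ===== PRECONDITION & SPEC =====
def Spec_verify_sequence (sequence : List (List Int)) (region_num : Int) (out : Bool) : Prop := out = verify_sequence_alt sequence region_num
instance (sequence : List (List Int)) (region_num : Int) (out : Bool) : Decidable (Spec_verify_sequence sequence region_num out) := by unfold Spec_verify_sequence; infer_instance

-- ===== CLAIM (what is proved, stated in full; the proofs are below) =====
def Claim_equal_verify_sequence : Prop := ∀ (sequence : List (List Int)) (region_num : Int), Dom_verify_sequence sequence region_num → Spec_verify_sequence sequence region_num (verify_sequence sequence region_num)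

-- ===== LEMMAS AND PROOFS =====

-- set(xs) is a sublist of xs
theorem pv_ofList_sublist (xs : List Int) : (PySem.Set.ofList xs).Sublist xs := by
  induction xs using List.reverseRecOn with
  | nil => simp [PySem.Set.ofList]
  | append_singleton xs x ih =>
    rw [PySem.Set.ofList_append_singleton]
    unfold PySem.Set.add
    by_cases h : PySem.Set.contains (PySem.Set.ofList xs) x = true
    · simp only [h, if_true]
      exact ih.trans (List.sublist_append_left xs [x])
    · simp only [h]
      rw [if_neg (by simp)]
      exact ih.append (List.Sublist.refl [x])

-- len(stage) == len(set(stage)) means stage has no duplicates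
theorem pv_nodup_of_len_ofList (xs : List Int)
    (h : (PySem.Set.ofList xs).length = xs.length) : xs.Nodup := by
  have he : PySem.Set.ofList xs = xs := (pv_ofList_sublist xs).eq_of_length h
  exact he ▸ PySem.Set.nodup_ofList xs

-- characterisation of A's loop
theorem verify_sequence_loop_iff (all : PySem.Set Int) (seq : List (List Int)) :
    ∀ inc : PySem.Set Int,
      (verify_sequence_loop all seq inc = true ↔
        seq.flatten.Nodup ∧ (∀ x ∈ seq.flatten, x ∉ inc) ∧
          (∀ x, (x ∈ inc ∨ x ∈ seq.flatten) ↔ x ∈ all)) := by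
  induction seq with
  | nil =>
    intro inc
    simp [verify_sequence_loop, PySem.Set.equal_iff]
  | cons stage rest ih =>
    intro inc
    simp only [verify_sequence_loop]
    by_cases hn : stage.Nodup
    · have hlen : ¬ stage.length ≠ (PySem.Set.ofList stage).length := by
        rw [PySem.Set.ofList_eq_self_of_nodup stage hn]; exact not_not_intro rfl
      rw [if_neg hlen]
      by_cases hd : ∀ x ∈ stage, x ∉ inc
      · have hdis : PySem.Set.isdisjoint (PySem.Set.ofList stage) inc = true := by
          rw [PySem.Set.isdisjoint_iff]
          intro x hx; exact hd x ((PySem.Set.mem_ofList stage x).mp hx)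
        rw [if_neg (not_not_intro hdis)]
        rw [ih (PySem.Set.update inc (PySem.Set.ofList stage))]
        have hmem : ∀ x : Int, x ∈ PySem.Set.update inc (PySem.Set.ofList stage) ↔
            (x ∈ inc ∨ x ∈ stage) := by
          intro x
          rw [PySem.Set.mem_update inc (PySem.Set.ofList stage) x,
            PySem.Set.mem_ofList stage x]
        constructor
        · rintro ⟨h1, h2, h3⟩
          refine ⟨?_, ?_, ?_⟩
          · rw [List.flatten_cons, List.nodup_append]
            refine ⟨hn, h1, ?_⟩
            intro a ha b hb heq
            subst heq
            exact (h2 a hb) ((hmem a).mpr (Or.inr ha))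
          · intro x hx
            rw [List.flatten_cons, List.mem_append] at hx
            rcases hx with hx | hx
            · exact hd x hx
            · intro hxi
              exact h2 x hx ((hmem x).mpr (Or.inl hxi))
          · intro x
            rw [← h3 x, hmem x, List.flatten_cons, List.mem_append]
            tauto
        · rintro ⟨h1, h2, h3⟩
          rw [List.flatten_cons, List.nodup_append] at h1
          obtain ⟨hns, hnr, hdisj⟩ := h1
          refine ⟨hnr, ?_, ?_⟩
          · intro x hx hxu
            rcases (hmem x).mp hxu with hxi | hxs
            · exact h2 x (by rw [List.flatten_cons, List.mem_append]; exact Or.inr hx) hxi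
            · exact absurd rfl (hdisj x hxs x hx)
          · intro x
            rw [← h3 x, hmem x, List.flatten_cons, List.mem_append]
            tauto
      · push Not at hd
        obtain ⟨x, hxs, hxi⟩ := hd
        have hdis : ¬ PySem.Set.isdisjoint (PySem.Set.ofList stage) inc = true := by
          rw [PySem.Set.isdisjoint_iff]
          push Not
          exact ⟨x, (PySem.Set.mem_ofList stage x).mpr hxs, hxi⟩
        rw [if_pos hdis]
        constructor
        · intro h; exact absurd h (by simp)
        · rintro ⟨-, h2, -⟩
          exact absurd hxi (h2 x (by rw [List.flatten_cons, List.mem_append]; exact Or.inl hxs))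
    · have hlen : stage.length ≠ (PySem.Set.ofList stage).length := by
        intro h
        exact hn (pv_nodup_of_len_ofList stage h.symm)
      rw [if_pos hlen]
      constructor
      · intro h; exact absurd h (by simp)
      · rintro ⟨h1, -, -⟩
        rw [List.flatten_cons, List.nodup_append] at h1
        exact (hn h1.1).elim

-- characterisation of B
theorem verify_sequence_alt_iff (sequence : List (List Int)) (region_num : Int) :
    verify_sequence_alt sequence region_num = true ↔
      sequence.flatten.Perm (PySem.List.pyRange 1 (region_num + 1) 1) := by
  unfold verify_sequence_alt
  rw [beq_iff_eq]
  constructor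
  · intro h
    have hp := PySem.List.sorted_perm sequence.flatten (fun x => x) false
    rw [h] at hp
    exact hp.symm
  · intro hp
    exact PySem.List.sorted_eq_of_perm_of_pairwise_lt sequence.flatten
      (PySem.List.pyRange 1 (region_num + 1) 1) (fun x => x) hp.symm
      (PySem.List.pairwise_lt_pyRange_one 1 (region_num + 1))

theorem verify_sequence_eq_alt (sequence : List (List Int)) (region_num : Int) :
    verify_sequence sequence region_num = verify_sequence_alt sequence region_num := by
  have hA := verify_sequence_loop_iff
    (PySem.Set.ofList (PySem.List.pyRange 1 (region_num + 1) 1)) sequence PySem.Set.empty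
  have hB := verify_sequence_alt_iff sequence region_num
  have hr : (PySem.List.pyRange 1 (region_num + 1) 1).Nodup :=
    PySem.List.nodup_pyRange_one 1 (region_num + 1)
  rw [Bool.eq_iff_iff]
  unfold verify_sequence
  rw [hA, hB]
  constructor
  · rintro ⟨h1, -, h3⟩
    rw [List.perm_ext_iff_of_nodup h1 hr]
    intro x
    have h := h3 x
    rw [PySem.Set.mem_ofList] at h
    simpa only [PySem.Set.empty, List.not_mem_nil, false_or] using h
  · intro hp
    refine ⟨hp.nodup_iff.mpr hr, ?_, ?_⟩
    · intro x _ hx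
      simp [PySem.Set.empty] at hx
    · intro x
      rw [PySem.Set.mem_ofList]
      simp only [PySem.Set.empty, List.not_mem_nil, false_or]
      exact hp.mem_iff

-- ===== VERDICT (by name: the statement is the Claim_ definition above) =====
theorem verify_sequence_spec : Claim_equal_verify_sequence := by
  intro sequence region_num _
  unfold Spec_verify_sequence
  exact verify_sequence_eq_alt sequence region_num
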